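-- pv_equiv track=rewrite | github.com/JoohyungDev/algorithm | 파이알고_100/행렬/행렬_최댓값과_최솟값.py | solution
-- ===== SOURCE A (Python) =====
-- import itertools
--
-- def solution(data):
--     matrix, _range = data
--     min_value, max_value = _range
--     real_min, real_max = None, None  # 반환할 진짜 최소, 최대값
--     # 범위에 해당하는 원소만 선택
--     flattened = [
--         i for i in itertools.chain.from_iterable(matrix) if min_value <= i <= max_value
--     ]
--     if flattened:
--         real_min, real_max = min(flattened), max(flattened)
--     return (real_max, real_min)
-- ===== SOURCE B (Python) =====
-- def solution(data):
--     matrix, _range = data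
--     lo, hi = _range
--     real_min = real_max = None
--     for row in matrix:
--         for i in row:
--             if lo <= i <= hi:
--                 if real_min is None:
--                     real_min = real_max = i
--                 else:
--                     if i < real_min:
--                         real_min = i
--                     if i > real_max:
--                         real_max = i
--     return (real_max, real_min)
-- ===== Notes on version B (the rewrite author's own statement) =====
-- stated objective: simpler
-- what changed: Replaced the three-pass approach (build a filtered intermediate list, then separate min() and max() calls) by one fused nested-loop pass that keeps running min/max and allocates no intermediate list.
import Mathlib
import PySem

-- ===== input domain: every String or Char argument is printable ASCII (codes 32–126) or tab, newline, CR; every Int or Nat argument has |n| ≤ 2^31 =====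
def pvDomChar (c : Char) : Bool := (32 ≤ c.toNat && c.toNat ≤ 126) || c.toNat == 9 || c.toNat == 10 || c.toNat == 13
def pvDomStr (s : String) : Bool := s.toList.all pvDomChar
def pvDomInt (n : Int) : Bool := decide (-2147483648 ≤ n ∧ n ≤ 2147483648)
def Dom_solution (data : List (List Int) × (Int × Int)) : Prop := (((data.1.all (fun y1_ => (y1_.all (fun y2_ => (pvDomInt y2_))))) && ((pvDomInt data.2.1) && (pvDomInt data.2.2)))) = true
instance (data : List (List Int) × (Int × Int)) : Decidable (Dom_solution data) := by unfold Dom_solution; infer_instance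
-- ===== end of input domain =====

-- B fuses A's three passes (filter-comprehension + min() + max()) into one nested-loop pass with running min/max.


-- ===== PORT A =====
def solution (data : List (List Int) × (Int × Int)) : Option Int × Option Int :=
  let matrix := data.1
  let min_value := data.2.1
  let max_value := data.2.2
  let flattened := (matrix.flatten).filter (fun i => decide (min_value ≤ i ∧ i ≤ max_value))
  if flattened.isEmpty then (none, none)
  else (PySem.List.max? flattened (fun x => x), PySem.List.min? flattened (fun x => x))

-- ===== PORT B =====
-- one step of B's inner loop: running (real_min, real_max) updated by element i
def altStep (lo hi : Int) (st : Option Int × Option Int) (i : Int) : Option Int × Option Int :=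
  if lo ≤ i ∧ i ≤ hi then
    match st with
    | (some a, some b) => (some (if i < a then i else a), some (if b < i then i else b))
    | _ => (some i, some i)
  else st

def solution_alt (data : List (List Int) × (Int × Int)) : Option Int × Option Int :=
  let st := data.1.foldl (fun st row => row.foldl (altStep data.2.1 data.2.2) st) (none, none)
  (st.2, st.1)

-- ===== PRECONDITION & SPEC =====
def Spec_solution (data : List (List Int) × (Int × Int)) (out : Option Int × Option Int) : Prop := out = solution_alt data
instance (data : List (List Int) × (Int × Int)) (out : Option Int × Option Int) : Decidable (Spec_solution data out) := by unfold Spec_solution; infer_instance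

-- ===== CLAIM (what is proved, stated in full; the proofs are below) =====
def Claim_equal_solution : Prop := ∀ (data : List (List Int) × (Int × Int)), Dom_solution data → Spec_solution data (solution data)

-- ===== LEMMAS AND PROOFS =====

theorem altStep_some (lo hi : Int) (xs : List Int) (a b : Int) :
    xs.foldl (altStep lo hi) (some a, some b) =
      (some ((xs.filter (fun i => decide (lo ≤ i ∧ i ≤ hi))).foldl min a),
       some ((xs.filter (fun i => decide (lo ≤ i ∧ i ≤ hi))).foldl max b)) := by
  induction xs generalizing a b with
  | nil => simp
  | cons x t ih =>
    by_cases h : lo ≤ x ∧ x ≤ hi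
    · simp [altStep, h, ih, min_def, max_def]
      constructor
      · congr 1; by_cases hx : x < a <;> simp [hx] <;> omega
      · congr 1; by_cases hx : b < x <;> simp [hx] <;> omega
    · simp [altStep, h, ih]

theorem altStep_none (lo hi : Int) (xs : List Int) :
    xs.foldl (altStep lo hi) (none, none) =
      match xs.filter (fun i => decide (lo ≤ i ∧ i ≤ hi)) with
      | [] => (none, none)
      | y :: t => (some (t.foldl min y), some (t.foldl max y)) := by
  induction xs with
  | nil => simp
  | cons x t ih =>
    by_cases h : lo ≤ x ∧ x ≤ hi
    · simp [altStep, h, altStep_some]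
    · simp [altStep, h, ih]

theorem solution_spec : Claim_equal_solution := by
  intro data _
  unfold Spec_solution solution solution_alt
  obtain ⟨matrix, lo, hi⟩ := data
  simp only [List.foldl_flatten.symm]
  rw [altStep_none]
  cases hf : (matrix.flatten).filter (fun i => decide (lo ≤ i ∧ i ≤ hi)) with
  | nil => simp
  | cons y t =>
    simp [PySem.List.max?_id_cons, PySem.List.min?_id_cons]

-- ===== VERDICT (by name: the statement is the Claim_ definition above) =====
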